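-- pv_equiv track=rewrite | github.com/blasfir/srom-3 | lab-3.py | fieldGalueAdd
-- ===== SOURCE A (Python) =====
-- def toTheSameLength(A, B):
--     if len(A) < len(B):
--         A = [0] * (len(B) - len(A)) + A
--     if len(A) > len(B):
--         B = [0] * (len(A) - len(B)) + B
--     return A, B
--
-- def deleteExtraZeros(A):
--     while A and A[0] == 0:
--         A.pop(0)
--     if not A:
--         return [0]
--     return A
--
-- def fieldGalueAdd(A, B):
--     A = deleteExtraZeros(A)
--     B = deleteExtraZeros(B)
--     A, B = toTheSameLength(A, B)
--     result = []
--     for i in range(len(A)):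
--         k = int(A[i]) + int(B[i])
--         n = k % 2
--         result.append(n)
--     result = deleteExtraZeros(result)
--     return result
-- ===== SOURCE B (Python) =====
-- def fieldGalueAdd(A, B):
--     # Encode each operand's parity bits as an integer (MSB-first fold),
--     # XOR the integers, then decode the bits of the result (LSB loop + reverse).
--     # Note: unlike A, B does not mutate its arguments; return values agree.
--     na = 0
--     for a in A:
--         na = na * 2 + a % 2
--     nb = 0
--     for b in B:
--         nb = nb * 2 + b % 2
--     r = na ^ nb
--     out = []
--     while r > 0:
--         out.append(r % 2)
--         r //= 2
--     return out[::-1] if out else [0]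
-- ===== Notes on version B (the rewrite author's own statement) =====
-- stated objective: alternative
-- what changed: B replaces A's strip-leading-zeros + pad-to-equal-length + indexed elementwise (a+b)%2 loop by packing each list's parity bits into one integer, XOR-ing the two integers, and decoding the result's binary digits; note A pops leading zeros off its argument lists in place while B leaves them untouched (return values agree).
import Mathlib
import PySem

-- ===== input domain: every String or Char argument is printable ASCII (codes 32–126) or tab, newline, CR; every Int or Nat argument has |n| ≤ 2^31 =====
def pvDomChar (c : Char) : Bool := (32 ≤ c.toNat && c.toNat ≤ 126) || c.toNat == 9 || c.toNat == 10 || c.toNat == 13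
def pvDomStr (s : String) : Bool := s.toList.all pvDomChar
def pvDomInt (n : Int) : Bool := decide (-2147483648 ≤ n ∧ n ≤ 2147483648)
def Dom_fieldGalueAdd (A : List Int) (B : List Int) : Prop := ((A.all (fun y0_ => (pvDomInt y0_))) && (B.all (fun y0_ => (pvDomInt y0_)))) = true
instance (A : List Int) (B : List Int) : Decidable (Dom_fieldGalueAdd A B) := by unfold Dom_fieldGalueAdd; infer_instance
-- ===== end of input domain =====

-- B re-implements GF(2) addition of bit lists by packing each list's parity bits into an
-- integer, XOR-ing once, and decoding the bits — instead of A's strip/pad/elementwise loop.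
-- Return values agree on all inputs; A additionally pops leading zeros off its argument
-- lists in place (an observable mutation B does not perform).

-- ===== PORT A =====
-- while A and A[0] == 0: A.pop(0); if not A: return [0]
def pvDelZeros : List Int → List Int
  | [] => [0]
  | x :: xs => if x = 0 then pvDelZeros xs else x :: xs

def pvToSameLength (A : List Int) (B : List Int) : List Int × List Int :=
  let A' := if A.length < B.length then List.replicate (B.length - A.length) 0 ++ A else A
  let B' := if B.length < A'.length then List.replicate (A'.length - B.length) 0 ++ B else B
  (A', B')

def fieldGalueAdd (A : List Int) (B : List Int) : List Int :=
  let p := pvToSameLength (pvDelZeros A) (pvDelZeros B)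
  let A2 := p.1
  let B2 := p.2
  -- for i in range(len(A)): result.append((int(A[i]) + int(B[i])) % 2)  (indices always in range)
  let result := (List.range A2.length).foldl
    (fun acc i => acc ++ [PySem.Int.mod (A2.getD i 0 + B2.getD i 0) 2]) []
  pvDelZeros result

-- ===== PORT B =====
-- while r > 0: out.append(r % 2); r //= 2
def pvBitsLoop (r : Int) (out : List Int) : List Int :=
  if _h : 0 < r then pvBitsLoop (PySem.Int.floordiv r 2) (out ++ [PySem.Int.mod r 2]) else out
termination_by r.toNat
decreasing_by
  rw [PySem.Int.floordiv_eq_ediv_of_pos (by norm_num)]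
  omega

def fieldGalueAdd_alt (A : List Int) (B : List Int) : List Int :=
  let na := A.foldl (fun n a => n * 2 + PySem.Int.mod a 2) 0
  let nb := B.foldl (fun n b => n * 2 + PySem.Int.mod b 2) 0
  let r := PySem.Int.bxor na nb
  let out := pvBitsLoop r []
  if out = [] then [0] else out.reverse

-- ===== PRECONDITION & SPEC =====
def Spec_fieldGalueAdd (A : List Int) (B : List Int) (out : List Int) : Prop := out = fieldGalueAdd_alt A B
instance (A : List Int) (B : List Int) (out : List Int) : Decidable (Spec_fieldGalueAdd A B out) := by unfold Spec_fieldGalueAdd; infer_instance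

-- ===== CLAIM (what is proved, stated in full; the proofs are below) =====
def Claim_equal_fieldGalueAdd : Prop := ∀ (A : List Int) (B : List Int), Dom_fieldGalueAdd A B → Spec_fieldGalueAdd A B (fieldGalueAdd A B)

-- ===== LEMMAS AND PROOFS =====

/-- Parity bit of an integer, as a natural number. -/
def pvB (x : Int) : Nat := (PySem.Int.mod x 2).toNat

/-- The number encoded by a list's parity bits, most significant first. -/
def pvV (L : List Int) : Nat := L.foldl (fun n a => 2 * n + pvB a) 0

/-- Binary digits of `n`, least significant first. -/
def pvLsb (n : Nat) : List Int :=
  if h : n = 0 then [] else ((n % 2 : Nat) : Int) :: pvLsb (n / 2)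
termination_by n
decreasing_by exact Nat.div_lt_self (Nat.pos_of_ne_zero h) (by norm_num)

lemma pvB_le (x : Int) : pvB x ≤ 1 := by
  unfold pvB
  rcases PySem.Int.mod_two_eq x with h | h <;> rw [h] <;> decide

lemma pvMod_eq_cast (x : Int) : PySem.Int.mod x 2 = ((pvB x : Nat) : Int) := by
  unfold pvB
  rcases PySem.Int.mod_two_eq x with h | h <;> rw [h] <;> decide

lemma pvV_cons (x : Int) (L : List Int) :
    pvV (x :: L) = L.foldl (fun n a => 2 * n + pvB a) (pvB x) := by
  simp [pvV]

lemma pvV_cons_zero (L : List Int) : pvV ((0 : Int) :: L) = pvV L := by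
  rw [pvV_cons]
  have : pvB 0 = 0 := by decide
  rw [this]; rfl

lemma pvV_append (L : List Int) (x : Int) : pvV (L ++ [x]) = 2 * pvV L + pvB x := by
  simp [pvV, List.foldl_append]

lemma pvV_replicate (k : Nat) (L : List Int) : pvV (List.replicate k 0 ++ L) = pvV L := by
  induction k with
  | zero => simp
  | succ k ih => simpa [List.replicate_succ, pvV_cons_zero] using ih

lemma pvV_delZeros (L : List Int) : pvV (pvDelZeros L) = pvV L := by
  induction L with
  | nil =>
      show pvV [0] = pvV []
      decide
  | cons x xs ih =>
      by_cases hx : x = 0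
      · subst hx; simpa [pvDelZeros, pvV_cons_zero] using ih
      · simp [pvDelZeros, hx]

lemma pvV_init_le (T : List Int) : ∀ m : Nat, m ≤ T.foldl (fun n a => 2 * n + pvB a) m := by
  induction T with
  | nil => intro m; simp
  | cons a T ih =>
      intro m
      calc m ≤ 2 * m + pvB a := by omega
        _ ≤ T.foldl (fun n a => 2 * n + pvB a) (2 * m + pvB a) := ih _
        _ = (a :: T).foldl (fun n a => 2 * n + pvB a) m := by simp

lemma pvV_one_cons_pos (T : List Int) : 1 ≤ pvV ((1 : Int) :: T) := by
  rw [pvV_cons]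
  have h1 : pvB 1 = 1 := by decide
  rw [h1]
  exact pvV_init_le T 1

lemma pvFold_cast (L : List Int) : ∀ m : Nat,
    L.foldl (fun n a => n * 2 + PySem.Int.mod a 2) (m : Int)
      = ((L.foldl (fun n a => 2 * n + pvB a) m : Nat) : Int) := by
  induction L with
  | nil => intro m; rfl
  | cons a L ih =>
      intro m
      have h : ((m : Int) * 2 + PySem.Int.mod a 2) = ((2 * m + pvB a : Nat) : Int) := by
        rw [pvMod_eq_cast a]; push_cast; ring
      show L.foldl (fun n a => n * 2 + PySem.Int.mod a 2) ((m : Int) * 2 + PySem.Int.mod a 2)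
        = ((L.foldl (fun n a => 2 * n + pvB a) (2 * m + pvB a) : Nat) : Int)
      rw [h]
      exact ih _

lemma pvBitsLoop_spec (n : Nat) : ∀ out : List Int, pvBitsLoop (n : Int) out = out ++ pvLsb n := by
  induction n using Nat.strong_induction_on with
  | _ n ih =>
      intro out
      by_cases h : n = 0
      · subst h
        rw [pvBitsLoop, pvLsb]
        simp
      · have hpos : (0 : Int) < (n : Int) := by exact_mod_cast Nat.pos_of_ne_zero h
        have h2 : (2 : Int) = ((2 : Nat) : Int) := by norm_cast
        have hf : PySem.Int.floordiv (n : Int) 2 = ((n / 2 : Nat) : Int) := by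
          rw [h2, PySem.Int.floordiv_natCast]
        have hm : PySem.Int.mod (n : Int) 2 = ((n % 2 : Nat) : Int) := by
          rw [h2, PySem.Int.mod_natCast]
        rw [pvBitsLoop, dif_pos hpos, hf, hm,
          ih (n / 2) (Nat.div_lt_self (Nat.pos_of_ne_zero h) (by norm_num))]
        conv_rhs => rw [pvLsb]
        rw [dif_neg h]
        simp

lemma pvXorSplit (a b u w : Nat) (hu : u ≤ 1) (hw : w ≤ 1) :
    (2 * a + u) ^^^ (2 * b + w) = 2 * (a ^^^ b) + (u ^^^ w) := by
  have h00 := Nat.xor_bit false a false b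
  have h01 := Nat.xor_bit false a true b
  have h10 := Nat.xor_bit true a false b
  have h11 := Nat.xor_bit true a true b
  simp [Nat.bit] at h00 h01 h10 h11
  interval_cases u <;> interval_cases w <;> simp_all

lemma pvB_f (x y : Int) : pvB (PySem.Int.mod (x + y) 2) = pvB x ^^^ pvB y := by
  have e : ∀ z : Int, PySem.Int.mod z 2 = z % 2 := fun z =>
    PySem.Int.mod_eq_emod_of_pos (by norm_num)
  have hx : x % 2 = 0 ∨ x % 2 = 1 := by omega
  have hy : y % 2 = 0 ∨ y % 2 = 1 := by omega
  unfold pvB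
  simp only [e]
  rcases hx with hx | hx <;> rcases hy with hy | hy
  · have h2 : (x + y) % 2 = 0 := by omega
    rw [hx, hy, h2]; decide
  · have h2 : (x + y) % 2 = 1 := by omega
    rw [hx, hy, h2]; decide
  · have h2 : (x + y) % 2 = 1 := by omega
    rw [hx, hy, h2]; decide
  · have h2 : (x + y) % 2 = 0 := by omega
    rw [hx, hy, h2]; decide

lemma pvV_zip (X : List Int) : ∀ Y : List Int, X.length = Y.length →
    pvV (List.zipWith (fun a b => PySem.Int.mod (a + b) 2) X Y) = pvV X ^^^ pvV Y := by
  induction X using List.reverseRecOn with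
  | nil =>
      intro Y h
      cases Y with
      | nil => simp [pvV]
      | cons y ys => simp at h
  | append_singleton X x ih =>
      intro Y h
      rcases Y.eq_nil_or_concat with rfl | ⟨Y', y, rfl⟩
      · simp at h
      · simp only [List.concat_eq_append] at h ⊢
        have hl : X.length = Y'.length := by simp at h; omega
        rw [List.zipWith_append hl]
        show pvV (List.zipWith _ X Y' ++ [PySem.Int.mod (x + y) 2]) = _
        rw [pvV_append, pvV_append, pvV_append, ih Y' hl, pvB_f,
          pvXorSplit _ _ _ _ (pvB_le x) (pvB_le y)]

lemma pvZip_bits (X : List Int) : ∀ Y : List Int,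
    ∀ z ∈ List.zipWith (fun a b => PySem.Int.mod (a + b) 2) X Y, z = 0 ∨ z = 1 := by
  induction X with
  | nil => intro Y z hz; simp at hz
  | cons x X ih =>
      intro Y z hz
      cases Y with
      | nil => simp at hz
      | cons y Y =>
          simp only [List.zipWith_cons_cons, List.mem_cons] at hz
          rcases hz with rfl | hz
          · exact PySem.Int.mod_two_eq _
          · exact ih Y z hz

lemma pvResult_eq_zip (X Y : List Int) (h : X.length = Y.length) :
    (List.range X.length).foldl
        (fun acc i => acc ++ [PySem.Int.mod (X.getD i 0 + Y.getD i 0) 2]) []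
      = List.zipWith (fun a b => PySem.Int.mod (a + b) 2) X Y := by
  rw [PySem.List.foldl_append_singleton_eq_map]
  simp only [List.nil_append]
  apply List.ext_getElem
  · simp [h]
  · intro i h1 h2
    simp only [List.getElem_map, List.getElem_range, List.getElem_zipWith]
    have hiX : i < X.length := by simpa using h1
    have hiY : i < Y.length := by omega
    rw [List.getD_eq_getElem X 0 hiX, List.getD_eq_getElem Y 0 hiY]

lemma pvLsb_of_one_cons (T : List Int) (hT : ∀ z ∈ T, z = 0 ∨ z = 1) :
    pvLsb (pvV ((1 : Int) :: T)) = T.reverse ++ [1] := by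
  induction T using List.reverseRecOn with
  | nil =>
      have h1 : pvV [(1 : Int)] = 1 := by decide
      rw [h1, pvLsb, dif_neg (by norm_num)]
      norm_num
      rw [pvLsb, dif_pos rfl]
  | append_singleton T b ih =>
      have hb : b = 0 ∨ b = 1 := hT b (by simp)
      have hTb : ∀ z ∈ T, z = 0 ∨ z = 1 := fun z hz => hT z (by simp [hz])
      have hV : pvV ((1 : Int) :: (T ++ [b])) = 2 * pvV ((1 : Int) :: T) + pvB b := by
        show pvV (((1 : Int) :: T) ++ [b]) = _
        rw [pvV_append]
      have hpos : 1 ≤ pvV ((1 : Int) :: T) := pvV_one_cons_pos T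
      have hble : pvB b ≤ 1 := pvB_le b
      rw [hV, pvLsb, dif_neg (by omega)]
      have hmod : (2 * pvV ((1 : Int) :: T) + pvB b) % 2 = pvB b := by omega
      have hdiv : (2 * pvV ((1 : Int) :: T) + pvB b) / 2 = pvV ((1 : Int) :: T) := by omega
      rw [hmod, hdiv, ih hTb]
      have hcast : ((pvB b : Nat) : Int) = b := by
        rcases hb with rfl | rfl <;> decide
      rw [hcast]
      simp

lemma pvDelZeros_canon (S : List Int) (hS : ∀ z ∈ S, z = 0 ∨ z = 1) :
    pvDelZeros S = if pvV S = 0 then [0] else (pvLsb (pvV S)).reverse := by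
  induction S with
  | nil => simp [pvDelZeros, pvV]
  | cons x S ih =>
      have hS' : ∀ z ∈ S, z = 0 ∨ z = 1 := fun z hz => hS z (by simp [hz])
      rcases hS x (by simp) with rfl | rfl
      · rw [show pvDelZeros ((0 : Int) :: S) = pvDelZeros S from by simp [pvDelZeros],
          pvV_cons_zero, ih hS']
      · have hpos : 1 ≤ pvV ((1 : Int) :: S) := pvV_one_cons_pos S
        rw [show pvDelZeros ((1 : Int) :: S) = (1 : Int) :: S from by simp [pvDelZeros],
          if_neg (by omega), pvLsb_of_one_cons S hS']
        simp

lemma pvLsb_zero : pvLsb 0 = [] := by rw [pvLsb]; simp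

lemma pvLsb_ne_nil (n : Nat) (h : n ≠ 0) : pvLsb n ≠ [] := by
  rw [pvLsb, dif_neg h]; simp

lemma pvAlt_eq (A B : List Int) :
    fieldGalueAdd_alt A B
      = if pvV A ^^^ pvV B = 0 then [0] else (pvLsb (pvV A ^^^ pvV B)).reverse := by
  have ha : A.foldl (fun n a => n * 2 + PySem.Int.mod a 2) 0 = ((pvV A : Nat) : Int) := by
    simpa using pvFold_cast A 0
  have hb : B.foldl (fun n b => n * 2 + PySem.Int.mod b 2) 0 = ((pvV B : Nat) : Int) := by
    simpa using pvFold_cast B 0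
  show (if pvBitsLoop (PySem.Int.bxor _ _) [] = [] then [0]
    else (pvBitsLoop (PySem.Int.bxor _ _) []).reverse) = _
  rw [ha, hb, PySem.Int.bxor_natCast, pvBitsLoop_spec _ [], List.nil_append]
  by_cases h : pvV A ^^^ pvV B = 0
  · rw [h, pvLsb_zero]; simp
  · rw [if_neg (pvLsb_ne_nil _ h), if_neg h]

lemma pvA_eq (A B : List Int) :
    fieldGalueAdd A B
      = if pvV A ^^^ pvV B = 0 then [0] else (pvLsb (pvV A ^^^ pvV B)).reverse := by
  unfold fieldGalueAdd pvToSameLength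
  set A1 := pvDelZeros A with hA1
  set B1 := pvDelZeros B with hB1
  set A2 := if A1.length < B1.length then List.replicate (B1.length - A1.length) 0 ++ A1 else A1 with hA2
  set B2 := if B1.length < A2.length then List.replicate (A2.length - B1.length) 0 ++ B1 else B1 with hB2
  have hlen : A2.length = B2.length := by
    rw [hA2, hB2]
    split_ifs with h1 h2 h3 <;> simp_all <;> omega
  have hvA2 : pvV A2 = pvV A := by
    rw [hA2]
    split_ifs with h1
    · rw [pvV_replicate, hA1, pvV_delZeros]
    · rw [hA1, pvV_delZeros]
  have hvB2 : pvV B2 = pvV B := by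
    rw [hB2]
    split_ifs with h1
    · rw [pvV_replicate, hB1, pvV_delZeros]
    · rw [hB1, pvV_delZeros]
  show pvDelZeros ((List.range A2.length).foldl
    (fun acc i => acc ++ [PySem.Int.mod (A2.getD i 0 + B2.getD i 0) 2]) []) = _
  rw [pvResult_eq_zip A2 B2 hlen,
    pvDelZeros_canon _ (pvZip_bits A2 B2),
    pvV_zip A2 B2 hlen, hvA2, hvB2]

-- ===== VERDICT (by name: the statement is the Claim_ definition above) =====
theorem fieldGalueAdd_spec : Claim_equal_fieldGalueAdd := by
  intro A B _
  unfold Spec_fieldGalueAdd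
  rw [pvA_eq, pvAlt_eq]
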